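-- pv_equiv track=rewrite | github.com/Coslate/Isaac-Lab-Arm-Manipulation-Continuous-Control-RL-and-Diffusion-Policy | train/progress.py | _line_kind
-- ===== SOURCE A (Python) =====
-- from collections.abc import Mapping
--
-- def _line_kind(metrics: Mapping[str, float]) -> str:
--     if any(key.startswith("eval_rollout/") for key in metrics):
--         return "eval rollout"
--     if any(key.startswith("train_rollout/") for key in metrics):
--         return "train rollout"
--     if any(key.startswith("eval/") for key in metrics):
--         return "eval"
--     if "train/update_step" in metrics or any(key.endswith("_loss") for key in metrics):
--         return "train"
--     return "env"
-- ===== SOURCE B (Python) =====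
-- def _line_kind(metrics) -> str:
--     saw_eval_ro = saw_train_ro = saw_eval = saw_train = False
--     for key in metrics:
--         if key.startswith("eval_rollout/"):
--             saw_eval_ro = True
--         elif key.startswith("train_rollout/"):
--             saw_train_ro = True
--         elif key.startswith("eval/"):
--             saw_eval = True
--         if key == "train/update_step" or key.endswith("_loss"):
--             saw_train = True
--     if saw_eval_ro:
--         return "eval rollout"
--     if saw_train_ro:
--         return "train rollout"
--     if saw_eval:
--         return "eval"
--     if saw_train:
--         return "train"
--     return "env"
-- ===== Notes on version B (the rewrite author's own statement) =====
-- stated objective: alternative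
-- what changed: Replaced four separate short-circuiting any() scans over the keys by one pass that collects presence flags, followed by a priority selection among the flags.
import Mathlib
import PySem

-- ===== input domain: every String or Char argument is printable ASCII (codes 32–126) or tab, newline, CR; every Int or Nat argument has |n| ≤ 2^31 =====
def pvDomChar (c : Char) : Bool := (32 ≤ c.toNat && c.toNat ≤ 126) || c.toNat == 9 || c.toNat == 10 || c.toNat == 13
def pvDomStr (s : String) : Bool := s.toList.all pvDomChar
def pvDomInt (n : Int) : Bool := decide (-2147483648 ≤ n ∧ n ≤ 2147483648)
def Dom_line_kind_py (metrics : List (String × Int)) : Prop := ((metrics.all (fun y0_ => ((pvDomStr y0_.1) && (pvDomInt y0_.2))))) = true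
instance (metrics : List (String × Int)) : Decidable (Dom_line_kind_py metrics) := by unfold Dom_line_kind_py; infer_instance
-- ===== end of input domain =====

-- B replaces A's four short-circuiting any() scans by one pass collecting presence flags
-- followed by a priority selection (objective: alternative decomposition, same cost).

-- ===== PORT A =====
def line_kind_py (metrics : List (String × Int)) : String :=
  if metrics.any (fun kv => PySem.Str.startswith kv.1 "eval_rollout/") then "eval rollout"
  else if metrics.any (fun kv => PySem.Str.startswith kv.1 "train_rollout/") then "train rollout"
  else if metrics.any (fun kv => PySem.Str.startswith kv.1 "eval/") then "eval"
  else if metrics.any (fun kv => kv.1 == "train/update_step")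
          || metrics.any (fun kv => PySem.Str.endswith kv.1 "_loss") then "train"
  else "env"

-- ===== PORT B =====
-- single pass: fold collecting four flags, then priority selection
def lineKindStep (st : Bool × Bool × Bool × Bool) (kv : String × Int) :
    Bool × Bool × Bool × Bool :=
  let key := kv.1
  let st1 :=
    if PySem.Str.startswith key "eval_rollout/" then (true, st.2.1, st.2.2.1, st.2.2.2)
    else if PySem.Str.startswith key "train_rollout/" then (st.1, true, st.2.2.1, st.2.2.2)
    else if PySem.Str.startswith key "eval/" then (st.1, st.2.1, true, st.2.2.2)
    else st
  if key == "train/update_step" || PySem.Str.endswith key "_loss" then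
    (st1.1, st1.2.1, st1.2.2.1, true)
  else st1

def line_kind_py_alt (metrics : List (String × Int)) : String :=
  let flags := metrics.foldl lineKindStep (false, false, false, false)
  if flags.1 then "eval rollout"
  else if flags.2.1 then "train rollout"
  else if flags.2.2.1 then "eval"
  else if flags.2.2.2 then "train"
  else "env"

-- ===== PRECONDITION & SPEC =====
def Spec_line_kind_py (metrics : List (String × Int)) (out : String) : Prop := out = line_kind_py_alt metrics
instance (metrics : List (String × Int)) (out : String) : Decidable (Spec_line_kind_py metrics out) := by unfold Spec_line_kind_py; infer_instance

-- ===== CLAIM (what is proved, stated in full; the proofs are below) =====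
def Claim_equal_line_kind_py : Prop := ∀ (metrics : List (String × Int)), Dom_line_kind_py metrics → Spec_line_kind_py metrics (line_kind_py metrics)

-- ===== LEMMAS AND PROOFS =====

-- distribute any over || (relates A's two fourth-condition scans to B's single test)
lemma any_or_split {α : Type} (l : List α) (p q : α → Bool) :
    (l.any fun a => p a || q a) = (l.any p || l.any q) := by
  induction l with
  | nil => rfl
  | cons x xs ih => simp [List.any_cons, ih, Bool.or_assoc, Bool.or_left_comm]

-- distinct prefixes (neither a prefix of the other) are pairwise exclusive
lemma prefix_excl (s p q : List Char)
    (hne : ¬ (p <+: q) ∧ ¬ (q <+: p))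
    (hp : PySem.Chars.startswith s p = true) :
    PySem.Chars.startswith s q = false := by
  cases hq : PySem.Chars.startswith s q with
  | false => rfl
  | true =>
    rcases List.prefix_or_prefix_of_prefix ((PySem.Chars.startswith_iff s p).mp hp)
      ((PySem.Chars.startswith_iff s q).mp hq) with h1 | h1
    · exact absurd h1 hne.1
    · exact absurd h1 hne.2

-- the fold computes exactly the four any-scans of A
lemma fold_flags (metrics : List (String × Int)) (st : Bool × Bool × Bool × Bool) :
    metrics.foldl lineKindStep st =
      (st.1 || metrics.any (fun kv => PySem.Str.startswith kv.1 "eval_rollout/"),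
       st.2.1 || metrics.any (fun kv => PySem.Str.startswith kv.1 "train_rollout/"),
       st.2.2.1 || metrics.any (fun kv => PySem.Str.startswith kv.1 "eval/"),
       st.2.2.2 || metrics.any (fun kv =>
          kv.1 == "train/update_step" || PySem.Str.endswith kv.1 "_loss")) := by
  induction metrics generalizing st with
  | nil => simp
  | cons kv rest ih =>
    obtain ⟨a, b, c, d⟩ := st
    rw [List.foldl_cons, ih]
    simp only [lineKindStep, List.any_cons, PySem.Str.startswith_eq, PySem.Str.endswith_eq]
    cases h1 : PySem.Chars.startswith kv.1.toList "eval_rollout/".toList <;>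
    cases h2 : PySem.Chars.startswith kv.1.toList "train_rollout/".toList <;>
    cases h3 : PySem.Chars.startswith kv.1.toList "eval/".toList <;>
    cases h4 : (kv.1 == "train/update_step" || PySem.Chars.endswith kv.1.toList "_loss".toList) <;>
    first
      | exact absurd ((prefix_excl _ _ _ (by decide) h1).symm.trans h2) (by decide)
      | exact absurd ((prefix_excl _ _ _ (by decide) h1).symm.trans h3) (by decide)
      | exact absurd ((prefix_excl _ _ _ (by decide) h2).symm.trans h3) (by decide)
      | (simp only [h1, h2, h3, h4, Bool.false_eq_true, eq_self_iff_true, if_true, if_false]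
         cases a <;> cases b <;> cases c <;> cases d <;> rfl)

-- ===== VERDICT (by name: the statement is the Claim_ definition above) =====
theorem line_kind_py_spec : Claim_equal_line_kind_py := by
  intro metrics _
  show line_kind_py metrics = line_kind_py_alt metrics
  unfold line_kind_py line_kind_py_alt
  rw [fold_flags]
  simp only [Bool.false_or, any_or_split]
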